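-- pv_equiv track=rewrite | github.com/rand/ananke-sglang | python/sglang/srt/constrained/ananke/core/token_classifier_rust.py | parse_rust_raw_string
-- ===== SOURCE A (Python) =====
-- from typing import Any, Dict, FrozenSet, List, Optional, Set, Tuple
--
-- def parse_rust_raw_string(text: str) -> Optional[str]:
--     """Parse a Rust raw string literal's value."""
--     # Count # symbols
--     if text.startswith('r'):
--         idx = 1
--     elif text.startswith('br'):
--         idx = 2
--     else:
--         return None
--
--     hash_count = 0
--     while idx < len(text) and text[idx] == '#':
--         hash_count += 1
--         idx += 1
--
--     if idx >= len(text) or text[idx] != '"':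
--         return None
--
--     # Find closing delimiter
--     end_delim = '"' + '#' * hash_count
--     end_idx = text.find(end_delim, idx + 1)
--     if end_idx != -1:
--         return text[idx + 1:end_idx]
--     return None
-- ===== SOURCE B (Python) =====
-- def parse_rust_raw_string(text):
--     """Parse a Rust raw string literal's value (single-pass state machine)."""
--     START, AFTER_B, OPEN, BODY = 0, 1, 2, 3
--     state = START
--     hashes = 0
--     matched = -1  # -1: no pending close candidate; k >= 0: saw '"' then k '#'s
--     buf = []
--     for c in text:
--         if state == START:
--             if c == 'r':
--                 state = OPEN
--             elif c == 'b':
--                 state = AFTER_B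
--             else:
--                 return None
--         elif state == AFTER_B:
--             if c == 'r':
--                 state = OPEN
--             else:
--                 return None
--         elif state == OPEN:
--             if c == '#':
--                 hashes += 1
--             elif c == '"':
--                 state = BODY
--             else:
--                 return None
--         else:  # BODY: online match of the closing '"' + '#'*hashes
--             if matched == -1:
--                 if c == '"':
--                     if hashes == 0:
--                         return ''.join(buf)
--                     matched = 0
--                 else:
--                     buf.append(c)
--             elif c == '#':
--                 matched += 1
--                 if matched == hashes:
--                     return ''.join(buf)
--             else:
--                 buf.append('"')
--                 buf.extend('#' * matched)
--                 if c == '"':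
--                     matched = 0
--                 else:
--                     buf.append(c)
--                     matched = -1
--     return None
-- ===== Notes on version B (the rewrite author's own statement) =====
-- stated objective: alternative
-- what changed: B replaces A's staged parse (prefix dispatch, '#'-counting while loop, then str.find for the closing '"'+'#'*n delimiter and slicing) by one left-to-right pass: a four-state machine over the characters with an accumulator buffer that matches the closing delimiter online (tracking how many '#'s follow a pending '"'), never calling find or slicing.
import Mathlib
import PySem

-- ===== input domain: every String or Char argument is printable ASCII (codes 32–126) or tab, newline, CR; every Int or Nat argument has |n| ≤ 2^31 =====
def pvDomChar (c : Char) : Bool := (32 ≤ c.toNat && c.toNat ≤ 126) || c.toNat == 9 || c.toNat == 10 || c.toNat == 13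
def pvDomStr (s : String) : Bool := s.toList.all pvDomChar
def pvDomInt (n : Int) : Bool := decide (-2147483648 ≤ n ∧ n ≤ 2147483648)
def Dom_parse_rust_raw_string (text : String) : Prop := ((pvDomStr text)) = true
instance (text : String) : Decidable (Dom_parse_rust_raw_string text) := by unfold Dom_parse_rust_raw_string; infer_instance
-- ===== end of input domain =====

-- B re-implements A as a single left-to-right pass: a four-state machine with an accumulator
-- that matches the closing delimiter online, instead of A's staged parse with str.find; objective: alternative.

-- ===== PORT A =====
-- A's while loop: advance idx over '#' characters, counting them; returns (hash_count, idx)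
def pyA_hashLoop (text : String) (idx hash_count : Nat) : Nat × Nat :=
  if h : (idx : Int) < PySem.Str.len text ∧ PySem.Str.pyGet? text (idx : Int) = some '#' then
    pyA_hashLoop text (idx + 1) (hash_count + 1)
  else (hash_count, idx)
termination_by (PySem.Str.len text).toNat - idx
decreasing_by
  have := h.1
  omega

-- A's body after the prefix dispatch set idx = idx0 (1 for 'r', 2 for 'br')
def pyA_rest (text : String) (idx0 : Nat) : Option String :=
  let hc := pyA_hashLoop text idx0 0
  let hash_count := hc.1
  let idx := hc.2
  if PySem.Str.len text ≤ (idx : Int) ∨ ¬ (PySem.Str.pyGet? text (idx : Int) = some '"') then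
    none
  else
    let end_delim := String.ofList ('"' :: List.replicate hash_count '#')  -- '"' + '#' * hash_count
    let end_idx := PySem.Str.findFrom text end_delim ((idx : Int) + 1)     -- text.find(end_delim, idx+1)
    if end_idx ≠ -1 then
      some (PySem.Str.slice text (some ((idx : Int) + 1)) (some end_idx))  -- text[idx+1:end_idx]
    else none

def parse_rust_raw_string (text : String) : Option String :=
  if PySem.Str.startswith text "r" then pyA_rest text 1
  else if PySem.Str.startswith text "br" then pyA_rest text 2
  else none

-- ===== PORT B =====
-- the loop in state BODY: matched = -1 (no pending candidate) or k ≥ 0 ('"' plus k '#'s pending)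
def pyB_body (hashes : Nat) : List Char → Int → List Char → Option String
  | [], _, _ => none
  | c :: t, matched, buf =>
    if matched = -1 then
      if c = '"' then
        if hashes = 0 then some (String.ofList buf)
        else pyB_body hashes t 0 buf
      else pyB_body hashes t (-1) (buf ++ [c])
    else if c = '#' then
      if matched + 1 = (hashes : Int) then some (String.ofList buf)
      else pyB_body hashes t (matched + 1) buf
    else
      let buf' := buf ++ '"' :: List.replicate matched.toNat '#'   -- flush the failed candidate
      if c = '"' then pyB_body hashes t 0 buf'
      else pyB_body hashes t (-1) (buf' ++ [c])

-- the loop in state OPEN: count '#'s, expect the opening '"'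
def pyB_open : List Char → Nat → Option String
  | [], _ => none
  | c :: t, hashes =>
    if c = '#' then pyB_open t (hashes + 1)
    else if c = '"' then pyB_body hashes t (-1) []
    else none

-- the loop in state AFTER_B: expect 'r'
def pyB_afterB : List Char → Option String
  | [] => none
  | c :: t => if c = 'r' then pyB_open t 0 else none

-- the loop in state START
def pyB_start : List Char → Option String
  | [] => none
  | c :: t =>
    if c = 'r' then pyB_open t 0
    else if c = 'b' then pyB_afterB t
    else none

def parse_rust_raw_string_alt (text : String) : Option String :=
  pyB_start text.toList

-- ===== PRECONDITION & SPEC =====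
def Spec_parse_rust_raw_string (text : String) (out : Option String) : Prop := out = parse_rust_raw_string_alt text
instance (text : String) (out : Option String) : Decidable (Spec_parse_rust_raw_string text out) := by unfold Spec_parse_rust_raw_string; infer_instance

-- ===== CLAIM (what is proved, stated in full; the proofs are below) =====
def Claim_equal_parse_rust_raw_string : Prop := ∀ (text : String), Dom_parse_rust_raw_string text → Spec_parse_rust_raw_string text (parse_rust_raw_string text)

-- ===== LEMMAS AND PROOFS =====

-- the common normal form both ports are reduced to: first occurrence of '"' ++ '#'^n in s
def pvDelim (n : Nat) : List Char := '"' :: List.replicate n '#'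

def pvFSpec (n : Nat) (s buf : List Char) : Option String :=
  let j := PySem.Chars.find s (pvDelim n)
  if j = -1 then none else some (String.ofList (buf ++ s.take j.toNat))

-- find = j  whenever j is the position of the leftmost occurrence
lemma drop_append_ge (p s : List Char) (i : Nat) (h : p.length ≤ i) :
    (p ++ s).drop i = s.drop (i - p.length) := by
  rw [List.drop_append, List.drop_eq_nil_of_le h, List.nil_append]

lemma find_eq_of (s sub : List Char) (j : Nat) (h1 : sub <+: s.drop j)
    (h2 : ∀ i < j, ¬ sub <+: s.drop i) : PySem.Chars.find s sub = j := by
  have hinf : sub <:+: s := h1.isInfix.trans (List.drop_suffix j s).isInfix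
  have hpos : 0 ≤ PySem.Chars.find s sub := (PySem.Chars.find_nonneg_iff s sub).mpr hinf
  obtain ⟨hp, hmin⟩ := PySem.Chars.find_spec hpos
  have hle1 : ¬ (PySem.Chars.find s sub).toNat < j := fun hlt => h2 _ hlt hp
  have hle2 : ¬ j < (PySem.Chars.find s sub).toNat := fun hlt => hmin j hlt h1
  omega

lemma find_eq_zero_of_prefix (s sub : List Char) (h : sub <+: s) :
    PySem.Chars.find s sub = 0 := by
  apply find_eq_of s sub 0 (by simpa using h)
  intro i hi; omega

lemma infix_exists_drop {s sub : List Char} (h : sub <:+: s) :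
    ∃ j, sub <+: s.drop j := by
  exact (PySem.Chars.exists_prefix_drop_iff_isIn sub s).mpr
    ((PySem.Chars.isIn_iff_infix sub s).mpr h)

-- shifting an occurrence-free prefix off the haystack
lemma find_shift (p s sub : List Char)
    (h : ∀ i < p.length, ¬ sub <+: (p ++ s).drop i) :
    PySem.Chars.find (p ++ s) sub =
      if PySem.Chars.find s sub = -1 then -1
      else (p.length : Int) + PySem.Chars.find s sub := by
  by_cases hns : PySem.Chars.find s sub = -1
  · rw [if_pos hns]
    rw [PySem.Chars.find_eq_neg_one_iff] at hns ⊢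
    intro hinf
    obtain ⟨j, hj⟩ := infix_exists_drop hinf
    by_cases hjp : j < p.length
    · exact h j hjp hj
    · apply hns
      rw [drop_append_ge p s j (by omega)] at hj
      exact hj.isInfix.trans (List.drop_suffix _ s).isInfix
  · rw [if_neg hns]
    have hpos : 0 ≤ PySem.Chars.find s sub := by
      have := PySem.Chars.neg_one_le_find s sub; omega
    obtain ⟨hp, hmin⟩ := PySem.Chars.find_spec hpos
    have hdrop : ∀ k : Nat, (p ++ s).drop (p.length + k) = s.drop k := by
      intro k
      rw [drop_append_ge p s _ (by omega)]
      congr 1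
      omega
    have := find_eq_of (p ++ s) sub (p.length + (PySem.Chars.find s sub).toNat)
      (by rw [hdrop]; exact hp)
      (by
        intro i hi
        by_cases hip : i < p.length
        · exact h i hip
        · rw [drop_append_ge p s i (by omega)]
          exact hmin _ (by omega))
    rw [this]
    omega

-- no occurrence of the delimiter starts inside '"' :: '#'^k followed by a non-'#' (k < n)
-- no occurrence of the delimiter starts inside '"' :: '#'^k followed by a non-'#' (k < n)
lemma no_occ_pend (n k : Nat) (c : Char) (t : List Char) (hk : k < n) (hc : c ≠ '#') :
    ∀ i < ('"' :: List.replicate k '#').length,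
      ¬ pvDelim n <+: (('"' :: List.replicate k '#') ++ c :: t).drop i := by
  intro i hi hpre
  simp only [List.length_cons, List.length_replicate] at hi
  obtain ⟨u, hu⟩ := hpre
  rcases Nat.eq_zero_or_pos i with h0 | hpos
  · subst h0
    simp only [List.drop_zero] at hu
    have h1 : (pvDelim n ++ u)[k + 1]? = some '#' := by
      simp only [pvDelim, List.cons_append, List.getElem?_cons_succ]
      rw [List.getElem?_append_left (by simpa using hk), List.getElem?_eq_getElem (by simpa using hk)]
      simp
    have h2 : (('"' :: List.replicate k '#') ++ c :: t)[k + 1]? = some c := by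
      simp only [List.cons_append, List.getElem?_cons_succ]
      rw [List.getElem?_append_right (by simp), List.length_replicate]
      simp
    rw [hu, h2] at h1
    exact hc (Option.some_inj.mp h1)
  · -- i ≥ 1: the dropped list starts with '#', the delimiter with '"'
    have hdrop : (('"' :: List.replicate k '#') ++ c :: t).drop i
        = (List.replicate k '#' ++ c :: t).drop (i - 1) := by
      obtain ⟨m, rfl⟩ : ∃ m, i = m + 1 := ⟨i - 1, by omega⟩
      simp [List.cons_append]
    have h1 : (pvDelim n ++ u)[0]? = some '"' := by simp [pvDelim]
    have h2 : ((List.replicate k '#' ++ c :: t).drop (i - 1))[0]? = some '#' := by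
      rw [List.getElem?_drop]
      rw [List.getElem?_append_left (by simp; omega), List.getElem?_eq_getElem (by simp; omega)]
      simp
    rw [hu, hdrop, h2] at h1
    exact absurd (Option.some_inj.mp h1) (by decide)

-- pvFSpec with an occurrence-free prefix moved into the buffer
lemma pvFSpec_shift (n : Nat) (p s buf : List Char)
    (h : ∀ i < p.length, ¬ pvDelim n <+: (p ++ s).drop i) :
    pvFSpec n (p ++ s) buf = pvFSpec n s (buf ++ p) := by
  unfold pvFSpec
  rw [find_shift p s _ h]
  by_cases hns : PySem.Chars.find s (pvDelim n) = -1
  · simp [hns]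
  · have hpos : 0 ≤ PySem.Chars.find s (pvDelim n) := by
      have := PySem.Chars.neg_one_le_find s (pvDelim n); omega
    rw [if_neg hns, if_neg (by omega), if_neg hns]
    have htn : ((p.length : Int) + PySem.Chars.find s (pvDelim n)).toNat
        = p.length + (PySem.Chars.find s (pvDelim n)).toNat := by omega
    rw [htn]
    have htake : (p ++ s).take (p.length + (PySem.Chars.find s (pvDelim n)).toNat)
        = p ++ s.take (PySem.Chars.find s (pvDelim n)).toNat := by
      rw [List.take_append, List.take_of_length_le (by omega)]
      congr 2
      omega
    rw [htake, List.append_assoc]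

lemma pvFSpec_of_prefix (n : Nat) (s buf : List Char) (h : pvDelim n <+: s) :
    pvFSpec n s buf = some (String.ofList buf) := by
  unfold pvFSpec
  rw [find_eq_zero_of_prefix s _ h]
  simp

lemma pvFSpec_short (n : Nat) (s buf : List Char) (h : s.length < n + 1) :
    pvFSpec n s buf = none := by
  unfold pvFSpec
  have : PySem.Chars.find s (pvDelim n) = -1 := by
    rw [PySem.Chars.find_eq_neg_one_iff]
    intro hinf
    have := hinf.length_le
    simp [pvDelim] at this
    omega
  simp [this]

-- BODY-state invariant: matched = -1 computes pvFSpec on the remaining input;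
-- matched = k computes pvFSpec with the pending '"' :: '#'^k virtually put back
lemma pyB_body_spec (n : Nat) : ∀ (m : Nat) (s : List Char), s.length ≤ m →
    (∀ buf, pyB_body n s (-1) buf = pvFSpec n s buf) ∧
    (∀ (k : Nat) buf, k < n →
      pyB_body n s (k : Int) buf = pvFSpec n (('"' :: List.replicate k '#') ++ s) buf) := by
  intro m
  induction m with
  | zero =>
    intro s hs
    have hnil : s = [] := by cases s <;> simp_all
    subst hnil
    refine ⟨fun buf => ?_, fun k buf hk => ?_⟩
    · rw [pvFSpec_short n [] buf (by simp)]
      rfl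
    · rw [pvFSpec_short n _ buf (by simp; omega)]
      simp only [pyB_body]
  | succ m ih =>
    intro s hs
    cases s with
    | nil =>
      refine ⟨fun buf => ?_, fun k buf hk => ?_⟩
      · rw [pvFSpec_short n [] buf (by simp)]
        rfl
      · rw [pvFSpec_short n _ buf (by simp; omega)]
        simp only [pyB_body]
    | cons c t =>
      have ht : t.length ≤ m := by simp at hs; omega
      obtain ⟨ih1, ih2⟩ := ih t ht
      refine ⟨fun buf => ?_, fun k buf hk => ?_⟩
      · -- matched = -1
        simp only [pyB_body, if_true]
        by_cases hq : c = '"'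
        · subst hq
          rw [if_pos rfl]
          by_cases hn0 : n = 0
          · subst hn0
            rw [if_pos rfl, pvFSpec_of_prefix 0 _ buf (by simp [pvDelim])]
          · rw [if_neg hn0]
            have := ih2 0 buf (by omega)
            simpa using this
        · rw [if_neg hq, ih1 (buf ++ [c])]
          have hshift := pvFSpec_shift n [c] t buf (by
            intro i hi hpre
            have hi0 : i = 0 := by simpa using hi
            subst hi0
            obtain ⟨u, hu⟩ := hpre
            simp only [pvDelim, List.drop_zero, List.cons_append, List.cons.injEq] at hu
            exact hq hu.1.symm)
          simpa using hshift.symm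
      · -- matched = k, k < n
        have hkne : ¬ ((k : Int) = -1) := by omega
        simp only [pyB_body, if_neg hkne]
        by_cases hsh : c = '#'
        · subst hsh
          rw [if_pos rfl]
          by_cases hlast : (k : Int) + 1 = (n : Int)
          · rw [if_pos hlast]
            have hkn : k + 1 = n := by omega
            have heq : ('"' :: List.replicate k '#') ++ '#' :: t = pvDelim n ++ t := by
              simp only [pvDelim, ← hkn, List.cons_append, List.cons.injEq, true_and]
              rw [List.replicate_succ']
              simp
            rw [heq, pvFSpec_of_prefix n _ buf (List.prefix_append _ _)]
          · rw [if_neg hlast]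
            have hk1 : k + 1 < n := by omega
            have hcast : ((k : Int) + 1) = ((k + 1 : Nat) : Int) := by omega
            rw [hcast, ih2 (k + 1) buf hk1]
            congr 1
            simp only [List.cons_append, List.cons.injEq, true_and]
            rw [List.replicate_succ']
            simp
        · rw [if_neg hsh]
          have htn : ((k : Int)).toNat = k := by omega
          rw [htn]
          by_cases hq : c = '"'
          · subst hq
            rw [if_pos rfl]
            have hh := ih2 0 (buf ++ '"' :: List.replicate k '#') (by omega)
            simp only [List.replicate_zero, Nat.cast_zero] at hh
            rw [hh]
            exact (pvFSpec_shift n ('"' :: List.replicate k '#') ('"' :: t) buf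
              (no_occ_pend n k '"' t hk (by decide))).symm
          · rw [if_neg hq, ih1 ((buf ++ '"' :: List.replicate k '#') ++ [c])]
            have hlist : ('"' :: List.replicate k '#') ++ c :: t
                = (('"' :: List.replicate k '#') ++ [c]) ++ t := by simp
            have hocc : ∀ i < (('"' :: List.replicate k '#') ++ [c]).length,
                ¬ pvDelim n <+: ((('"' :: List.replicate k '#') ++ [c]) ++ t).drop i := by
              intro i hi hpre
              simp only [List.length_append, List.length_cons, List.length_replicate] at hi
              rw [← hlist] at hpre
              by_cases hik : i < k + 1
              · exact no_occ_pend n k c t hk hsh i (by simp; omega) hpre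
              · have hik1 : i = k + 1 := by simp at hi; omega
                subst hik1
                have hdrop : (('"' :: List.replicate k '#') ++ c :: t).drop (k + 1) = c :: t := by
                  rw [drop_append_ge _ _ _ (by simp)]
                  simp
                rw [hdrop] at hpre
                obtain ⟨u, hu⟩ := hpre
                simp only [pvDelim, List.cons_append, List.cons.injEq] at hu
                exact hq hu.1.symm
            rw [hlist, pvFSpec_shift n _ t buf hocc]
            congr 1
            simp

lemma takeWhile_length_eq (s : List Char) :
    (s.takeWhile (· == '#')).length = s.length - (s.dropWhile (· == '#')).length := by
  have := congrArg List.length (List.takeWhile_append_dropWhile (p := (· == '#')) (l := s))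
  simp only [List.length_append] at this
  omega

-- OPEN-state: count hashes, then the body reduces to pvFSpec
lemma pyB_open_eq : ∀ (s : List Char) (h : Nat),
    pyB_open s h =
      (let stripped := s.dropWhile (· == '#')
       if stripped.head? = some '"' then
         pvFSpec (h + (s.takeWhile (· == '#')).length) (stripped.drop 1) []
       else none) := by
  intro s
  induction s with
  | nil => intro h; simp [pyB_open]
  | cons c t ih =>
    intro h
    by_cases hsh : c = '#'
    · subst hsh
      simp only [pyB_open, reduceIte]
      rw [ih (h + 1)]
      simp only [List.dropWhile_cons, List.takeWhile_cons, beq_self_eq_true, if_true,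
        List.length_cons]
      have harith : h + 1 + (t.takeWhile (· == '#')).length
          = h + ((t.takeWhile (· == '#')).length + 1) := by omega
      rw [harith]
    · by_cases hq : c = '"'
      · subst hq
        simp only [pyB_open, reduceIte]
        rw [(pyB_body_spec h t.length t (le_refl _)).1 []]
        simp
      · have hsh' : (c == '#') = false := by simp [hsh]
        simp [pyB_open, hsh, hq, hsh']

-- A's hash-counting loop counts exactly the leading run of '#' from position idx
lemma pyA_hashLoop_eq (text : String) (idx hc : Nat) :
    pyA_hashLoop text idx hc =
      (hc + ((text.toList.drop idx).takeWhile (· == '#')).length,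
       idx + ((text.toList.drop idx).takeWhile (· == '#')).length) := by
  fun_induction pyA_hashLoop text idx hc with
  | case1 idx hc h ih =>
    have h2 := h.2
    rw [PySem.Str.pyGet?_natCast] at h2
    have hlt : idx < text.toList.length := by
      have h1 := h.1
      have := PySem.Str.len_eq text
      omega
    have hget : text.toList[idx] = '#' := by
      rw [List.getElem?_eq_getElem hlt] at h2
      exact Option.some_inj.mp h2
    have hdrop : text.toList.drop idx = '#' :: text.toList.drop (idx + 1) := by
      rw [← List.getElem_cons_drop hlt, hget]
    rw [ih, hdrop]
    simp only [List.takeWhile_cons, beq_self_eq_true, if_true, List.length_cons, Prod.mk.injEq]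
    omega
  | case2 idx hc h =>
    have hz : ((text.toList.drop idx).takeWhile (· == '#')).length = 0 := by
      rw [not_and] at h
      by_cases hlt : idx < text.toList.length
      · have h2 := h (by have := PySem.Str.len_eq text; omega)
        rw [PySem.Str.pyGet?_natCast, List.getElem?_eq_getElem hlt] at h2
        have hne : (text.toList[idx] == '#') = false := by
          simp only [beq_eq_false_iff_ne, ne_eq]
          intro hcontra
          exact h2 (by rw [hcontra])
        rw [← List.getElem_cons_drop hlt]
        simp [hne]
      · rw [List.drop_eq_nil_of_le (by omega)]
        simp
    simp [hz]

-- A's tail computation (from a fixed start index) reduces to the same pvFSpec normal form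
lemma pyA_rest_eq (text : String) (idx0 : Nat) :
    pyA_rest text idx0 =
      (let rest := text.toList.drop idx0
       let stripped := rest.dropWhile (· == '#')
       if stripped.head? = some '"' then
         pvFSpec (rest.length - stripped.length) (stripped.drop 1) []
       else none) := by
  set n := ((text.toList.drop idx0).takeWhile (· == '#')).length with hn
  set idx := idx0 + n with hidx
  set rest := text.toList.drop idx0 with hrest
  set stripped := rest.dropWhile (· == '#') with hstripped
  have htw : rest.takeWhile (· == '#') ++ stripped = rest := List.takeWhile_append_dropWhile
  have hstr : stripped = text.toList.drop idx := by
    have hds : rest.drop n = stripped := by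
      conv_lhs => rw [← htw]
      rw [List.drop_append_of_le_length (by simp [hn, hrest])]
      simp [hn, hrest]
    rw [← hds, hrest, List.drop_drop, hidx]
  have hlenstr : rest.length = n + stripped.length := by
    conv_lhs => rw [← htw]
    simp [hn, hrest]
  have hhashes : rest.length - stripped.length = n := by omega
  have hhead : (stripped.head? = some '"') ↔ text.toList[idx]? = some '"' := by
    rw [hstr, List.head?_drop]
  unfold pyA_rest
  rw [pyA_hashLoop_eq]
  simp only [Nat.zero_add, ← hn, ← hidx, ← hrest, ← hstripped, hhashes]
  by_cases hq : text.toList[idx]? = some '"'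
  · -- opening quote found: both reduce to the first-occurrence search
    have hlt : idx < text.toList.length := (List.getElem?_eq_some_iff.mp hq).1
    have hcondA : ¬ (PySem.Str.len text ≤ (idx : Int) ∨
        ¬ (PySem.Str.pyGet? text (idx : Int) = some '"')) := by
      rw [not_or, not_not]
      rw [PySem.Str.len_eq, PySem.Str.pyGet?_natCast]
      exact ⟨by rw [not_le]; exact_mod_cast hlt, hq⟩
    rw [if_neg hcondA, if_pos (hhead.mpr hq)]
    have hdrop1 : stripped.drop 1 = text.toList.drop (idx + 1) := by
      rw [hstr, List.drop_drop]
    rw [PySem.Str.findFrom_eq]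
    have hdelim : (String.ofList ('"' :: List.replicate n '#')).toList = pvDelim n := by
      simp [pvDelim]
    rw [hdelim]
    have hcast : ((idx : Int) + 1) = ((idx + 1 : Nat) : Int) := by push_cast; ring
    rw [hcast, PySem.Chars.findFrom_natCast _ _ (idx + 1) (by omega)]
    unfold pvFSpec
    rw [hdrop1]
    set j := PySem.Chars.find (text.toList.drop (idx + 1)) (pvDelim n) with hj
    by_cases hjneg : j = -1
    · simp [hjneg]
    · have hj0 : 0 ≤ j := by
        have hge := PySem.Chars.neg_one_le_find (text.toList.drop (idx + 1)) (pvDelim n)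
        rw [← hj] at hge
        omega
      have hne : ¬ (((idx + 1 : Nat) : Int) + j = -1) := by omega
      have hto : (PySem.Str.slice text (some ((idx + 1 : Nat) : Int))
          (some (((idx + 1 : Nat) : Int) + j))).toList
          = (text.toList.drop (idx + 1)).take j.toNat := by
        rw [PySem.Str.toList_slice, PySem.Chars.slice_eq_listSlice,
          PySem.List.slice_toNat _ (by omega) (by omega)]
        have e1 : ((idx + 1 : Nat) : Int).toNat = idx + 1 := by omega
        have e2 : (((idx + 1 : Nat) : Int) + j).toNat - ((idx + 1 : Nat) : Int).toNat = j.toNat := by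
          omega
        rw [e2, e1]
      have hof : PySem.Str.slice text (some ((idx + 1 : Nat) : Int))
          (some (((idx + 1 : Nat) : Int) + j)) =
          String.ofList ((text.toList.drop (idx + 1)).take j.toNat) := by
        have h := congrArg String.ofList hto
        simpa using h
      rw [if_neg hjneg, if_neg hjneg]
      simp only [ne_eq, List.nil_append]
      rw [if_pos hne, hof]
  · -- no opening quote at idx: both return None
    have hcondA : PySem.Str.len text ≤ (idx : Int) ∨
        ¬ (PySem.Str.pyGet? text (idx : Int) = some '"') := by
      right
      rw [PySem.Str.pyGet?_natCast]
      exact hq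
    rw [if_pos hcondA, if_neg (fun h => hq (hhead.mp h))]

-- ===== VERDICT (by name: the statement is the Claim_ definition above) =====
-- both ports reduce to the same normal form once the prefix is consumed
lemma pyAB_bridge (text : String) (k : Nat) :
    pyA_rest text k = pyB_open (text.toList.drop k) 0 := by
  rw [pyA_rest_eq, pyB_open_eq]
  simp only [Nat.zero_add]
  rw [takeWhile_length_eq]

theorem parse_rust_raw_string_spec : Claim_equal_parse_rust_raw_string := by
  unfold Claim_equal_parse_rust_raw_string
  intro text _
  unfold Spec_parse_rust_raw_string parse_rust_raw_string parse_rust_raw_string_alt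
  have hr : PySem.Str.startswith text "r" = PySem.Chars.startswith text.toList ['r'] := by
    rw [PySem.Str.startswith_eq]
    rfl
  have hbr : PySem.Str.startswith text "br" = PySem.Chars.startswith text.toList ['b', 'r'] := by
    rw [PySem.Str.startswith_eq]
    rfl
  by_cases hR : PySem.Str.startswith text "r" = true
  · rw [if_pos hR]
    rw [hr, PySem.Chars.startswith_iff] at hR
    obtain ⟨t, ht⟩ := hR
    simp only [List.singleton_append] at ht
    rw [pyAB_bridge text 1, ← ht]
    simp [pyB_start]
  · rw [if_neg hR]
    by_cases hBR : PySem.Str.startswith text "br" = true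
    · rw [if_pos hBR]
      rw [hbr, PySem.Chars.startswith_iff] at hBR
      obtain ⟨u, hu⟩ := hBR
      simp only [List.cons_append, List.nil_append] at hu
      rw [pyAB_bridge text 2, ← hu]
      simp [pyB_start, pyB_afterB]
    · rw [if_neg hBR]
      rw [hr, PySem.Chars.startswith_iff] at hR
      rw [hbr, PySem.Chars.startswith_iff] at hBR
      cases hl : text.toList with
      | nil => simp [pyB_start]
      | cons c t =>
        rw [hl] at hR hBR
        have hcr : ¬ c = 'r' := fun h => hR (by subst h; simp [List.cons_prefix_cons])
        cases hcb : decide (c = 'b') with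
        | true =>
          have hb : c = 'b' := of_decide_eq_true hcb
          subst hb
          cases t with
          | nil => simp [pyB_start, pyB_afterB, hcr]
          | cons c2 u =>
            have hc2 : ¬ c2 = 'r' := fun h => hBR (by subst h; simp [List.cons_prefix_cons])
            simp [pyB_start, pyB_afterB, hcr, hc2]
        | false =>
          have hb : ¬ c = 'b' := of_decide_eq_false hcb
          simp [pyB_start, hcr, hb]
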